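-- pv_equiv track=rewrite | github.com/yunhaibeidu/PRECISE | src/protease_rules.py | Trypsin
-- ===== SOURCE A (Python) =====
-- from typing import List, Callable
--
-- def Trypsin(seq: str, seq_len: int) -> List[int]:
--     """
--     胰蛋白酶切割位点识别
--     特殊规则：
--     1. 在K、R后切割，但P除外
--     2. 特殊情况下阻止切割
--     """
--     cleavage = []
--
--     # 基本切割规则
--     for i in range(seq_len):
--         if i < seq_len - 1:
--             # 基本切割：K、R后（除P外）
--             if seq[i] in ['K', 'R'] and seq[i+1] != 'P':
--                 cleavage.append(i)
--
--             # 特殊情况：WKP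
--             if i < seq_len - 2 and seq[i] == 'W':
--                 if seq[i+1] == 'K' and seq[i+2] == 'P':
--                     cleavage.append(i+1)
--
--             # 特殊情况：MRP
--             if i < seq_len - 2 and seq[i] == 'M':
--                 if seq[i+1] == 'R' and seq[i+2] == 'P':
--                     cleavage.append(i+1)
--
--     # 阻止切割的特殊情况
--     block_conditions = [
--         # DC条件
--         (lambda i: i < seq_len - 2 and
--          seq[i] in ['D', 'C'] and
--          seq[i+1] == 'K' and
--          seq[i+2] == 'D'),
--
--         # CK特定条件
--         (lambda i: i < seq_len - 2 and
--          seq[i] == 'C' and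
--          seq[i+1] == 'K' and
--          seq[i+2] in ['H', 'Y']),
--
--         # CRK条件
--         (lambda i: i < seq_len - 2 and
--          seq[i] == 'C' and
--          seq[i+1] == 'R' and
--          seq[i+2] == 'K'),
--
--         # RRH条件
--         (lambda i: i < seq_len - 2 and
--          seq[i] == 'R' and
--          seq[i+1] == 'R' and
--          seq[i+2] in ['H', 'R'])
--     ]
--
--     # 移除被阻止的切割位点
--     for condition in block_conditions:
--         for i in range(seq_len):
--             if condition(i) and i+1 in cleavage:
--                 cleavage.remove(i+1)
--
--     return cleavage
-- ===== SOURCE B (Python) =====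
-- def Trypsin(seq: str, seq_len: int):
--     """Single pass: decide for each position whether it is a kept cleavage site."""
--     def keep(p):
--         c1 = seq[p]
--         c2 = seq[p + 1]
--         c0 = seq[p - 1] if p > 0 else '-'
--         if c1 == 'K':
--             cut = c2 != 'P' or c0 == 'W'
--             blocked = (c0 in ('D', 'C') and c2 == 'D') or (c0 == 'C' and c2 in ('H', 'Y'))
--         elif c1 == 'R':
--             cut = c2 != 'P' or c0 == 'M'
--             blocked = (c0 == 'C' and c2 == 'K') or (c0 == 'R' and c2 in ('H', 'R'))
--         else:
--             return False
--         return cut and not blocked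
--     return [p for p in range(seq_len - 1) if keep(p)]
-- ===== Notes on version B (the rewrite author's own statement) =====
-- stated objective: faster
-- what changed: replaced A's append-then-remove two-phase algorithm (build list, then four block passes each doing O(n) membership tests and list.remove) by a single comprehension that decides per position, from the three surrounding characters, whether it is a cut and not blocked
-- outside the precondition, e.g. on Trypsin('A', 2): A returns [], B raises IndexError
import Mathlib
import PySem

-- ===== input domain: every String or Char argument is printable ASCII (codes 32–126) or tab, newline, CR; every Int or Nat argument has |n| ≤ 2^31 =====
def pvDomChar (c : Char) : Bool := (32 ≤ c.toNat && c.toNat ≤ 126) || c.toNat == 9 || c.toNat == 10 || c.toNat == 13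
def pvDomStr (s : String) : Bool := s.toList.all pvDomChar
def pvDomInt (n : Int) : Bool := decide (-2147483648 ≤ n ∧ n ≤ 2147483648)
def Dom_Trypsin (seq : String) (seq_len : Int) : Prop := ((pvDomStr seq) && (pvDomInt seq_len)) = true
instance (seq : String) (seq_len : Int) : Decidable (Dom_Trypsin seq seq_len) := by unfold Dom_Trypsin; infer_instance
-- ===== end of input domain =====

-- B replaces A's build-then-four-removal-passes algorithm by one per-position test; return-value
-- equivalence is proved on Pre_ (seq_len ≤ len(seq) or seq_len ≤ 1), where Python's A returns.

-- seq[i]; Pre_Trypsin keeps every evaluated index in range, so the default is never returned there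
def pvGet (cs : List Char) (i : Int) : Char := PySem.List.pyGetD cs i '\u0000'

-- ===== PORT A =====
-- the body of A's first loop ("基本切割规则")
def pvStep1 (cs : List Char) (n : Int) (cl : List Int) (i : Int) : List Int :=
  if i < n - 1 then
    let cl := if (pvGet cs i == 'K' || pvGet cs i == 'R') && pvGet cs (i+1) != 'P'
              then cl ++ [i] else cl
    let cl := if decide (i < n - 2) && pvGet cs i == 'W' then
                (if pvGet cs (i+1) == 'K' && pvGet cs (i+2) == 'P' then cl ++ [i+1] else cl)
              else cl
    let cl := if decide (i < n - 2) && pvGet cs i == 'M' then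
                (if pvGet cs (i+1) == 'R' && pvGet cs (i+2) == 'P' then cl ++ [i+1] else cl)
              else cl
    cl
  else cl

-- A's four block-condition lambdas
def pvCond1 (cs : List Char) (n : Int) (i : Int) : Bool :=
  decide (i < n - 2) && (pvGet cs i == 'D' || pvGet cs i == 'C') &&
  pvGet cs (i+1) == 'K' && pvGet cs (i+2) == 'D'
def pvCond2 (cs : List Char) (n : Int) (i : Int) : Bool :=
  decide (i < n - 2) && pvGet cs i == 'C' && pvGet cs (i+1) == 'K' &&
  (pvGet cs (i+2) == 'H' || pvGet cs (i+2) == 'Y')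
def pvCond3 (cs : List Char) (n : Int) (i : Int) : Bool :=
  decide (i < n - 2) && pvGet cs i == 'C' && pvGet cs (i+1) == 'R' && pvGet cs (i+2) == 'K'
def pvCond4 (cs : List Char) (n : Int) (i : Int) : Bool :=
  decide (i < n - 2) && pvGet cs i == 'R' && pvGet cs (i+1) == 'R' &&
  (pvGet cs (i+2) == 'H' || pvGet cs (i+2) == 'R')

-- "if condition(i) and i+1 in cleavage: cleavage.remove(i+1)"  (remove guarded by the membership test)
def pvStep2 (cond : Int → Bool) (cl : List Int) (i : Int) : List Int :=
  if cond i && decide ((i+1) ∈ cl) then (PySem.List.remove? cl (i+1)).getD cl else cl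

def Trypsin (seq : String) (seq_len : Int) : List Int :=
  let cs := seq.toList
  let cleavage := (PySem.List.pyRange 0 seq_len 1).foldl (pvStep1 cs seq_len) []
  let blockConditions : List (Int → Bool) :=
    [pvCond1 cs seq_len, pvCond2 cs seq_len, pvCond3 cs seq_len, pvCond4 cs seq_len]
  blockConditions.foldl
    (fun cl cond => (PySem.List.pyRange 0 seq_len 1).foldl (pvStep2 cond) cl) cleavage

-- ===== PORT B =====
-- Source B's keep(p): from the three surrounding characters decide cut-and-not-blocked
def pvKeep (cs : List Char) (p : Int) : Bool :=
  let c1 := pvGet cs p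
  let c2 := pvGet cs (p+1)
  let c0 := if 0 < p then pvGet cs (p-1) else '-'
  if c1 == 'K' then
    (c2 != 'P' || c0 == 'W') &&
    !(((c0 == 'D' || c0 == 'C') && c2 == 'D') || (c0 == 'C' && (c2 == 'H' || c2 == 'Y')))
  else if c1 == 'R' then
    (c2 != 'P' || c0 == 'M') &&
    !((c0 == 'C' && c2 == 'K') || (c0 == 'R' && (c2 == 'H' || c2 == 'R')))
  else false

def Trypsin_alt (seq : String) (seq_len : Int) : List Int :=
  (PySem.List.pyRange 0 (seq_len - 1) 1).filter (pvKeep seq.toList)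

-- ===== PRECONDITION & SPEC =====
-- Pre_ excludes seq_len > len(seq) with seq_len ≥ 2: there Python's A raises IndexError, except
-- when short-circuit evaluation happens to skip every out-of-range access and A returns an
-- accidental value (e.g. ('A', 2) → []), which B does not reproduce (it raises there).
def Pre_Trypsin (seq : String) (seq_len : Int) : Prop :=
  seq_len ≤ (seq.toList.length : Int) ∨ seq_len ≤ 1
instance (seq : String) (seq_len : Int) : Decidable (Pre_Trypsin seq seq_len) := by
  unfold Pre_Trypsin; infer_instance

def pvWitness_Trypsin : String × Int := ("WKPAKRC", 7)

def Spec_Trypsin (seq : String) (seq_len : Int) (out : List Int) : Prop := out = Trypsin_alt seq seq_len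
instance (seq : String) (seq_len : Int) (out : List Int) : Decidable (Spec_Trypsin seq seq_len out) := by
  unfold Spec_Trypsin; infer_instance

-- ===== CLAIM (what is proved, stated in full; the proofs are below) =====
def Claim_equal_Trypsin : Prop := ∀ (seq : String) (seq_len : Int), Dom_Trypsin seq seq_len → Pre_Trypsin seq seq_len → Spec_Trypsin seq seq_len (Trypsin seq seq_len)

-- ===== LEMMAS AND PROOFS =====

-- characters emitted by A's first loop at index i
def pvEmit (cs : List Char) (n : Int) (i : Int) : List Int :=
  (if decide (i < n - 1) && ((pvGet cs i == 'K' || pvGet cs i == 'R') && pvGet cs (i+1) != 'P')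
   then [i] else []) ++
  (if decide (i < n - 2) && (pvGet cs i == 'W' && pvGet cs (i+1) == 'K' && pvGet cs (i+2) == 'P'
      || pvGet cs i == 'M' && pvGet cs (i+1) == 'R' && pvGet cs (i+2) == 'P')
   then [i+1] else [])

-- "position p was appended by a special (WKP/MRP) rule", i.e. by pvEmit at i = p-1
def pvPend (cs : List Char) (n : Int) (p : Int) : Bool :=
  decide (1 ≤ p) && decide (p < n - 1) &&
  (pvGet cs (p-1) == 'W' && pvGet cs p == 'K' && pvGet cs (p+1) == 'P'
   || pvGet cs (p-1) == 'M' && pvGet cs p == 'R' && pvGet cs (p+1) == 'P')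

-- "position p is a cut after A's first loop"
def pvCut (cs : List Char) (n : Int) (p : Int) : Bool :=
  decide (p < n - 1) && ((pvGet cs p == 'K' || pvGet cs p == 'R') && pvGet cs (p+1) != 'P')
  || pvPend cs n p

lemma pvStep1_eq (cs : List Char) (n : Int) (cl : List Int) (i : Int) :
    pvStep1 cs n cl i = cl ++ pvEmit cs n i := by
  have hWM : ¬ ((pvGet cs i == 'W') = true ∧ (pvGet cs i == 'M') = true) := by
    rintro ⟨h1, h2⟩
    rw [beq_iff_eq] at h1 h2; rw [h1] at h2; exact absurd h2 (by decide)
  have h12 : i < n - 2 → i < n - 1 := by omega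
  unfold pvStep1 pvEmit
  split_ifs <;> simp_all <;> omega

lemma pend_succ (cs : List Char) (n : Int) (m : Nat) :
    pvPend cs n ((m : Int) + 1) =
      (decide ((m : Int) < n - 2) &&
        (pvGet cs (m : Int) == 'W' && pvGet cs ((m : Int)+1) == 'K' && pvGet cs ((m : Int)+2) == 'P'
         || pvGet cs (m : Int) == 'M' && pvGet cs ((m : Int)+1) == 'R' && pvGet cs ((m : Int)+2) == 'P')) := by
  unfold pvPend
  have e2 : (m : Int) + 1 - 1 = (m : Int) := by ring
  have e3 : (m : Int) + 1 + 1 = (m : Int) + 2 := by ring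
  rw [e2, e3]
  have e4 : decide (1 ≤ (m : Int) + 1) = true := by simp
  have e5 : decide ((m : Int) + 1 < n - 1) = decide ((m : Int) < n - 2) := by
    rw [decide_eq_decide]; omega
  rw [e4, e5, Bool.true_and]

lemma if_singleton_or (a b : Bool) (x : Int) (h : ¬ (a = true ∧ b = true)) :
    (if a = true then [x] else []) ++ (if b = true then [x] else []) =
      (if (b || a) = true then [x] else []) := by
  cases a <;> cases b <;> simp_all

lemma pend_basic_disjoint (cs : List Char) (n : Int) (p : Int) :
    ¬ (pvPend cs n p = true ∧
       (decide (p < n - 1) && ((pvGet cs p == 'K' || pvGet cs p == 'R') && pvGet cs (p+1) != 'P')) = true) := by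
  rintro ⟨h1, h2⟩
  unfold pvPend at h1
  simp only [Bool.and_eq_true, Bool.or_eq_true, beq_iff_eq, bne_iff_ne] at h1 h2
  tauto

lemma phase1_aux (cs : List Char) (n : Int) (m : Nat) :
    (PySem.List.pyRange 0 (m : Int) 1).flatMap (pvEmit cs n) =
      (PySem.List.pyRange 0 (m : Int) 1).filter (pvCut cs n) ++
        (if pvPend cs n (m : Int) then [(m : Int)] else []) := by
  induction m with
  | zero =>
    rw [Nat.cast_zero, PySem.List.pyRange_one_eq_nil (by omega)]
    simp [pvPend]
  | succ m ih =>
    have e1 : ((m + 1 : Nat) : Int) = (m : Int) + 1 := by push_cast; ring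
    rw [e1, PySem.List.pyRange_one_succ_right (by positivity), List.flatMap_append,
        List.filter_append, ih, List.append_assoc, List.append_assoc]
    congr 1
    rw [List.flatMap_cons, List.flatMap_nil, List.append_nil, List.filter_cons]
    rw [pend_succ]
    unfold pvEmit
    rw [← List.append_assoc, if_singleton_or _ _ _ (pend_basic_disjoint cs n (m : Int))]
    unfold pvCut
    rfl

lemma phase1 (cs : List Char) (n : Int) :
    (PySem.List.pyRange 0 n 1).foldl (pvStep1 cs n) [] =
      (PySem.List.pyRange 0 n 1).filter (pvCut cs n) := by
  have hfold : (PySem.List.pyRange 0 n 1).foldl (pvStep1 cs n) [] =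
      (PySem.List.pyRange 0 n 1).foldl (fun cl i => cl ++ pvEmit cs n i) [] :=
    PySem.List.foldl_congr_mem _ _ _ [] (fun cl i _ => pvStep1_eq cs n cl i)
  rw [hfold, PySem.List.foldl_append_eq_flatMap, List.nil_append]
  by_cases hn : n ≤ 0
  · rw [PySem.List.pyRange_one_eq_nil hn]; rfl
  · have hm : ((n.toNat : Nat) : Int) = n := Int.toNat_of_nonneg (by omega)
    have := phase1_aux cs n n.toNat
    rw [hm] at this
    rw [this]
    have hp : pvPend cs n n = false := by
      unfold pvPend
      have : decide (n < n - 1) = false := by simp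
      rw [this]; simp
    rw [hp]; simp

lemma pass_eq (c : Int → Bool) (is : List Int) (l : List Int) (h : l.Nodup) :
    is.foldl (pvStep2 c) l = l.filter (fun p => !(is.any (fun i => c i && p == i + 1))) := by
  induction is generalizing l with
  | nil => simp
  | cons i is ih =>
    rw [List.foldl_cons]
    by_cases hc : c i = true
    · by_cases hm : (i + 1) ∈ l
      · have hstep : pvStep2 c l i = l.erase (i + 1) := by
          unfold pvStep2
          rw [hc, decide_eq_true hm, Bool.true_and, if_pos rfl,
              PySem.List.remove?_eq_some_erase l (i+1) hm, Option.getD_some]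
        rw [hstep, ih _ (h.erase _), List.Nodup.erase_eq_filter h, List.filter_filter]
        refine List.filter_congr fun p _ => ?_
        rw [List.any_cons, hc, Bool.true_and, Bool.not_or, Bool.and_comm]
        rfl
      · have hstep : pvStep2 c l i = l := by
          unfold pvStep2
          rw [decide_eq_false hm]; simp
        rw [hstep, ih _ h]
        refine List.filter_congr fun p hp => ?_
        rw [List.any_cons, hc, Bool.true_and]
        have : (p == i + 1) = false := by
          refine beq_eq_false_iff_ne.mpr fun he => hm ?_
          rw [← he]; exact hp
        rw [this, Bool.false_or]
    · have hstep : pvStep2 c l i = l := by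
        unfold pvStep2
        rw [Bool.eq_false_iff.mpr hc]; simp
      rw [hstep, ih _ h]
      refine List.filter_congr fun p _ => ?_
      rw [List.any_cons, Bool.eq_false_iff.mpr hc, Bool.false_and, Bool.false_or]

lemma any_shift (c : Int → Bool) (n p : Int) :
    ((PySem.List.pyRange 0 n 1).any fun i => c i && p == i + 1) =
      (decide (1 ≤ p) && decide (p ≤ n) && c (p - 1)) := by
  rw [Bool.eq_iff_iff]
  simp only [List.any_eq_true, PySem.List.mem_pyRange_one, Bool.and_eq_true, beq_iff_eq,
    decide_eq_true_eq]
  constructor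
  · rintro ⟨i, ⟨hi0, hin⟩, hci, hpi⟩
    subst hpi
    refine ⟨⟨by omega, by omega⟩, ?_⟩
    have : i + 1 - 1 = i := by ring
    rw [this]; exact hci
  · rintro ⟨⟨h1, h2⟩, hc⟩
    exact ⟨p - 1, ⟨by omega, by omega⟩, hc, by ring⟩

lemma keep_char (cs : List Char) (n : Int) (p : Int) (h0 : 0 ≤ p) (h1 : p < n - 1) :
    (!(decide (1 ≤ p) && decide (p ≤ n) && pvCond4 cs n (p - 1)) &&
     !(decide (1 ≤ p) && decide (p ≤ n) && pvCond3 cs n (p - 1)) &&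
     !(decide (1 ≤ p) && decide (p ≤ n) && pvCond2 cs n (p - 1)) &&
     !(decide (1 ≤ p) && decide (p ≤ n) && pvCond1 cs n (p - 1)) && pvCut cs n p) =
      pvKeep cs p := by
  unfold pvCut pvPend pvCond1 pvCond2 pvCond3 pvCond4 pvKeep
  have e1 : p - 1 + 1 = p := by ring
  have e2 : p - 1 + 2 = p + 1 := by ring
  rw [e1, e2]
  have d1 : decide (p < n - 1) = true := by simp [h1]
  have d2 : decide (p ≤ n) = true := by simp; omega
  have d3 : decide (p - 1 < n - 2) = true := by simp; omega
  rw [d1, d2, d3]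
  by_cases hp : 1 ≤ p
  · have d4 : decide (1 ≤ p) = true := by simp [hp]
    have d5 : 0 < p := by omega
    rw [d4, if_pos d5]
    rw [Bool.eq_iff_iff]
    simp only [Bool.and_eq_true, Bool.or_eq_true, Bool.not_eq_true', Bool.and_eq_false_iff,
      Bool.true_and, beq_iff_eq, bne_iff_ne]
    by_cases hK : pvGet cs p = 'K' <;> by_cases hR : pvGet cs p = 'R' <;>
      simp_all <;> by_cases hP : pvGet cs (p+1) = 'P' <;> simp_all <;> tauto
  · have hp0 : p = 0 := by omega
    subst hp0
    have d4 : decide ((1:Int) ≤ 0) = false := by simp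
    rw [d4]
    simp only [Bool.false_and, Bool.not_false, Bool.true_and, lt_irrefl]
    rw [Bool.eq_iff_iff]
    simp only [Bool.and_eq_true, Bool.or_eq_true, beq_iff_eq, bne_iff_ne]
    by_cases hK : pvGet cs 0 = 'K' <;> by_cases hR : pvGet cs 0 = 'R' <;> simp_all <;> tauto

-- ===== VERDICT (by name: the statement is the Claim_ definition above) =====
theorem Trypsin_spec : Claim_equal_Trypsin := by
  intro seq n hdom hpre
  unfold Spec_Trypsin Trypsin Trypsin_alt
  simp only [List.foldl_cons, List.foldl_nil]
  rw [phase1]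
  have h0 : (List.filter (pvCut seq.toList n) (PySem.List.pyRange 0 n 1)).Nodup :=
    List.Nodup.filter _ (PySem.List.nodup_pyRange_one 0 n)
  rw [pass_eq _ _ _ h0]
  rw [pass_eq _ _ _ (List.Nodup.filter _ h0)]
  rw [pass_eq _ _ _ (List.Nodup.filter _ (List.Nodup.filter _ h0))]
  rw [pass_eq _ _ _ (List.Nodup.filter _ (List.Nodup.filter _ (List.Nodup.filter _ h0)))]
  rw [List.filter_filter, List.filter_filter, List.filter_filter, List.filter_filter]
  simp only [any_shift]
  by_cases hn : n ≤ 0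
  · rw [PySem.List.pyRange_one_eq_nil hn, PySem.List.pyRange_one_eq_nil (by omega : n - 1 ≤ 0)]
    rfl
  · have hsing : PySem.List.pyRange (n-1) n 1 = [n-1] := by
      have h := PySem.List.pyRange_one_singleton (n - 1)
      rwa [show n - 1 + 1 = n by ring] at h
    rw [PySem.List.pyRange_one_append 0 (n-1) n (by omega) (by omega), hsing, List.filter_append]
    have hcutf : pvCut seq.toList n (n-1) = false := by
      unfold pvCut pvPend
      have : decide (n - 1 < n - 1) = false := by simp
      rw [this]; simp
    have hlast : List.filter (fun a =>
        !(decide (1 ≤ a) && decide (a ≤ n) && pvCond4 seq.toList n (a - 1)) &&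
        !(decide (1 ≤ a) && decide (a ≤ n) && pvCond3 seq.toList n (a - 1)) &&
        !(decide (1 ≤ a) && decide (a ≤ n) && pvCond2 seq.toList n (a - 1)) &&
        !(decide (1 ≤ a) && decide (a ≤ n) && pvCond1 seq.toList n (a - 1)) && pvCut seq.toList n a) [n-1] = [] := by
      simp [hcutf]
    rw [hlast, List.append_nil]
    refine List.filter_congr fun p hp => ?_
    rw [PySem.List.mem_pyRange_one] at hp
    exact keep_char seq.toList n p hp.1 (by omega)
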